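-- pv_equiv track=rewrite | github.com/mahadi097/Competitive-Programming | Leetcode/Contests/Biweekly Contest 175/3824. Minimum K to Reduce Array Within Limit.py | minimumK
-- ===== SOURCE A (Python) =====
-- from typing import List
--
-- def minimumK(nums: List[int]) -> int:
--     ans = 10**5 + 2
--
--     def operations(k: int) -> bool:
--         cnt = 0
--         for num in nums:
--             cnt += num // k + (1 if num % k != 0 else 0)
--         return cnt <= k**2
--
--     st, en = 1, ans
--     while st <= en:
--         mid = (st + en) // 2
--         if operations(mid):
--             ans = mid
--             en = mid - 1
--         else:
--             st = mid + 1
--     return ans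
-- ===== SOURCE B (Python) =====
-- def minimumK(nums):
--     LIMIT = 10 ** 5 + 2
--
--     def fits(k):
--         # ceiling division as one negated floor division
--         return sum(-(-num // k) for num in nums) <= k * k
--
--     def search(lo, hi):
--         # pure bisection: returns the final feasible probe, or None if no
--         # probe on this path is feasible (no mutable accumulator)
--         if lo > hi:
--             return None
--         mid = (lo + hi) // 2
--         if fits(mid):
--             deeper = search(lo, mid - 1)
--             return mid if deeper is None else deeper
--         return search(mid + 1, hi)
--
--     found = search(1, LIMIT)
--     return LIMIT if found is None else found
-- ===== Notes on version B (the rewrite author's own statement) =====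
-- stated objective: alternative
-- what changed: The probe sequence must be preserved (the feasibility predicate is not monotone in k for mixed-sign inputs, so any other search strategy returns different values on reachable inputs); B restructures it as a pure Optional-returning recursion with no mutable 'ans' accumulator -- each level returns the deepest feasible probe of its subpath, the caller substitutes the default -- and computes the ceiling as a single negated floor division instead of floor division plus a remainder test.
import Mathlib
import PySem

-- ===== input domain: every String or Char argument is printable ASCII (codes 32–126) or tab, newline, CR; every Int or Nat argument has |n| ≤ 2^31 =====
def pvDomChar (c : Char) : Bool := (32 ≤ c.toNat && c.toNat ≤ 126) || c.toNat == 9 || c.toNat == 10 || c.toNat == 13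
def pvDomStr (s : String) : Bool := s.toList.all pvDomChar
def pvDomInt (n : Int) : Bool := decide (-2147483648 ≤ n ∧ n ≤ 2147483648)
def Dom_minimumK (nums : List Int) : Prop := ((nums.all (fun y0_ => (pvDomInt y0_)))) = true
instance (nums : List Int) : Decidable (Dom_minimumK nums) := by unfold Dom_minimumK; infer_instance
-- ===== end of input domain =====

-- B keeps A's probe sequence (the feasibility predicate is not monotone in k on mixed-sign inputs, so the
-- probes are part of the behaviour) but replaces the mutable-'ans' while-loop by a pure Option-returning
-- recursion — each level returns the deepest feasible probe of its subpath, the caller fills in the default —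
-- with the ceiling as one negated floor division. Loops carry a fuel parameter that only makes the same
-- computation total.

-- ===== PORT A =====
-- inner helper 'operations(k)': cnt = 0; for num in nums: cnt += num//k + (1 if num%k!=0 else 0); return cnt <= k**2
def minimumKOps (nums : List Int) (k : Int) : Int :=
  nums.foldl (fun cnt num =>
    cnt + (PySem.Int.floordiv num k + (if PySem.Int.mod num k ≠ 0 then 1 else 0))) 0

-- the 'while st <= en' loop, state (st, en, ans)
def minimumKGo (nums : List Int) : Nat → Int → Int → Int → Int
  | 0, _, _, ans => ans
  | fuel + 1, st, en, ans =>
    if st ≤ en then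
      if minimumKOps nums (PySem.Int.floordiv (st + en) 2) ≤ (PySem.Int.floordiv (st + en) 2) ^ 2 then
        minimumKGo nums fuel st (PySem.Int.floordiv (st + en) 2 - 1) (PySem.Int.floordiv (st + en) 2)
      else
        minimumKGo nums fuel (PySem.Int.floordiv (st + en) 2 + 1) en ans
    else ans

def minimumK (nums : List Int) : Int :=
  minimumKGo nums 100003 1 (10 ^ 5 + 2) (10 ^ 5 + 2)

-- ===== PORT B =====
-- fits(k): sum(-(-num // k) for num in nums) <= k * k
def minimumKCeilSum (nums : List Int) (k : Int) : Int :=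
  (nums.map (fun num => -(PySem.Int.floordiv (-num) k))).sum

-- search(lo, hi): pure bisection, Optional result, no accumulator
def minimumKSearch (nums : List Int) : Nat → Int → Int → Option Int
  | 0, _, _ => none
  | fuel + 1, lo, hi =>
    if lo > hi then none
    else
      let mid := PySem.Int.floordiv (lo + hi) 2
      if minimumKCeilSum nums mid ≤ mid * mid then
        match minimumKSearch nums fuel lo (mid - 1) with
        | none => some mid
        | some deeper => some deeper
      else minimumKSearch nums fuel (mid + 1) hi

def minimumK_alt (nums : List Int) : Int :=
  match minimumKSearch nums 100003 1 (10 ^ 5 + 2) with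
  | none => 10 ^ 5 + 2
  | some found => found

-- ===== PRECONDITION & SPEC =====
def Spec_minimumK (nums : List Int) (out : Int) : Prop := out = minimumK_alt nums
instance (nums : List Int) (out : Int) : Decidable (Spec_minimumK nums out) := by unfold Spec_minimumK; infer_instance

-- ===== CLAIM (what is proved, stated in full; the proofs are below) =====
def Claim_equal_minimumK : Prop := ∀ (nums : List Int), Dom_minimumK nums → Spec_minimumK nums (minimumK nums)

-- ===== LEMMAS AND PROOFS =====

-- pointwise: num//k + (num%k != 0)  =  -((-num)//k)  for k > 0
theorem minimumK_ceil_pointwise (num k : Int) (hk : 0 < k) :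
    PySem.Int.floordiv num k + (if PySem.Int.mod num k ≠ 0 then 1 else 0)
      = -(PySem.Int.floordiv (-num) k) := by
  symm
  rw [PySem.Int.neg_floordiv_neg_eq_iff_of_pos hk]
  have heq := PySem.Int.floordiv_mul_add_mod num k
  have h0 := PySem.Int.mod_nonneg num hk
  have h1 := PySem.Int.mod_lt num hk
  split_ifs with h
  · have hm0 : 0 < PySem.Int.mod num k := lt_of_le_of_ne h0 (Ne.symm h)
    constructor
    · have e : (PySem.Int.floordiv num k + 1 - 1) * k = PySem.Int.floordiv num k * k := by ring
      rw [e]; linarith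
    · have e : (PySem.Int.floordiv num k + 1) * k = PySem.Int.floordiv num k * k + k := by ring
      rw [e]; linarith
  · have hm0 : PySem.Int.mod num k = 0 := by omega
    constructor
    · have e : (PySem.Int.floordiv num k + 0 - 1) * k = PySem.Int.floordiv num k * k - k := by ring
      rw [e]; linarith
    · have e : (PySem.Int.floordiv num k + 0) * k = PySem.Int.floordiv num k * k := by ring
      rw [e]; linarith

-- the two per-k sums agree for k > 0
theorem minimumK_cnt_eq (nums : List Int) (k : Int) (hk : 0 < k) :
    minimumKOps nums k = minimumKCeilSum nums k := by
  unfold minimumKOps minimumKCeilSum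
  induction nums using List.reverseRecOn with
  | nil => simp
  | append_singleton xs x ih =>
      simp only [List.foldl_append, List.foldl_cons, List.foldl_nil, List.map_append,
        List.map_cons, List.map_nil, List.sum_append, List.sum_cons, List.sum_nil, ih]
      rw [minimumK_ceil_pointwise x k hk]
      ring

-- A's loop is B's pure search with the running 'ans' as the default of the Option
theorem minimumK_go_eq_search (nums : List Int) :
    ∀ (fuel : Nat) (st en ans : Int), 1 ≤ st →
      minimumKGo nums fuel st en ans = (minimumKSearch nums fuel st en).getD ans := by
  intro fuel
  induction fuel with
  | zero => intro st en ans _; rfl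
  | succ fuel ih =>
      intro st en ans hst
      rw [minimumKGo, minimumKSearch]
      by_cases hle : st ≤ en
      · rw [if_pos hle, if_neg (by omega : ¬ st > en)]
        have hm := PySem.Int.floordiv_two_mid_bounds hle
        simp only []
        set mid := PySem.Int.floordiv (st + en) 2 with hmid
        have hcond : (minimumKOps nums mid ≤ mid ^ 2) ↔ (minimumKCeilSum nums mid ≤ mid * mid) := by
          rw [minimumK_cnt_eq nums mid (by omega), sq]
        by_cases hf : minimumKCeilSum nums mid ≤ mid * mid
        · rw [if_pos (hcond.mpr hf), if_pos hf, ih st (mid - 1) mid hst]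
          cases minimumKSearch nums fuel st (mid - 1) <;> rfl
        · rw [if_neg (fun h => hf (hcond.mp h)), if_neg hf]
          exact ih (mid + 1) en ans (by omega)
      · rw [if_neg hle, if_pos (by omega : st > en)]
        rfl

-- ===== VERDICT (by name: the statement is the Claim_ definition above) =====
theorem minimumK_spec : Claim_equal_minimumK := by
  intro nums _
  unfold Spec_minimumK minimumK minimumK_alt
  rw [minimumK_go_eq_search nums 100003 1 (10 ^ 5 + 2) (10 ^ 5 + 2) (by norm_num)]
  cases minimumKSearch nums 100003 1 (10 ^ 5 + 2) <;> rfl
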